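-- pv_equiv track=rewrite | github.com/liskos/kudryshov | ege15/82.py | f
-- ===== SOURCE A (Python) =====
-- def f(a):
--     p = set(range(3, 33+1))
--     q = set(range(22, 44+1))
--     for x in range(0, 100):
--         c = (x not in q) or ((x not in p) or (x in a))
--         if not c:
--             return False
--     return True
-- ===== SOURCE B (Python) =====
-- def f(a):
--     required = set(range(3, 33 + 1)) & set(range(22, 44 + 1))  # = {22, ..., 33}
--     return all(x in a for x in required)
-- ===== Notes on version B (the rewrite author's own statement) =====
-- stated objective: simpler
-- what changed: B builds the required set {22..33} once as the intersection of the two ranges and returns all(x in a for x in required), replacing A's 100-iteration scan with its three-way composite predicate and early-exit branch.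
import Mathlib
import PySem

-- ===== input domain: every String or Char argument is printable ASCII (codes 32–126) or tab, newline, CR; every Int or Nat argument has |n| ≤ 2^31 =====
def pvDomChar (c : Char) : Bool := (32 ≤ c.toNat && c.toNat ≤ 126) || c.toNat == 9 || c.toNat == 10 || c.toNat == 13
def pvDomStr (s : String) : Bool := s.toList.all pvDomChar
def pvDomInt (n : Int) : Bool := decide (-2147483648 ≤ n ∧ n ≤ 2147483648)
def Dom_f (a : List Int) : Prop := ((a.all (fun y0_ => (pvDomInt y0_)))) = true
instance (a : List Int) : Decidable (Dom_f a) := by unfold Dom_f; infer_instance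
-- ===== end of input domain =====

-- B replaces A's 0..99 scan with a composite predicate by a single pass over the
-- pre-built intersection {22..33}; objective: simpler.

-- ===== PORT A =====
-- the for-loop over range(0, 100) with its early 'return False'
def fLoop (p q : PySem.Set Int) (a : List Int) : List Int → Bool
  | [] => true
  | x :: rest =>
    let c := !(PySem.Set.contains q x) || (!(PySem.Set.contains p x) || a.contains x)
    if !c then false else fLoop p q a rest

def f (a : List Int) : Bool :=
  let p : PySem.Set Int := PySem.Set.ofList (PySem.List.pyRange 3 (33 + 1) 1)
  let q : PySem.Set Int := PySem.Set.ofList (PySem.List.pyRange 22 (44 + 1) 1)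
  fLoop p q a (PySem.List.pyRange 0 100 1)

-- ===== PORT B =====
def f_alt (a : List Int) : Bool :=
  let required : PySem.Set Int :=
    PySem.Set.inter (PySem.Set.ofList (PySem.List.pyRange 3 (33 + 1) 1))
                    (PySem.Set.ofList (PySem.List.pyRange 22 (44 + 1) 1))
  required.all (fun x => a.contains x)

-- ===== PRECONDITION & SPEC =====
def Spec_f (a : List Int) (out : Bool) : Prop := out = f_alt a
instance (a : List Int) (out : Bool) : Decidable (Spec_f a out) := by unfold Spec_f; infer_instance

-- ===== CLAIM (what is proved, stated in full; the proofs are below) =====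
def Claim_equal_f : Prop := ∀ (a : List Int), Dom_f a → Spec_f a (f a)

-- ===== LEMMAS AND PROOFS =====
theorem fLoop_eq_all (p q : PySem.Set Int) (a : List Int) (xs : List Int) :
    fLoop p q a xs
      = xs.all (fun x => !(PySem.Set.contains q x) || (!(PySem.Set.contains p x) || a.contains x)) := by
  induction xs with
  | nil => rfl
  | cons x rest ih =>
    simp only [fLoop, List.all_cons]
    cases (!(PySem.Set.contains q x) || (!(PySem.Set.contains p x) || a.contains x)) <;>
      simp [ih]

-- ===== VERDICT (by name: the statement is the Claim_ definition above) =====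
theorem f_spec : Claim_equal_f := by
  intro a _
  unfold Spec_f f f_alt
  rw [fLoop_eq_all]
  rfl
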